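-- pv_equiv track=rewrite | github.com/aharslan/cortado-core | cortado_core/negative_process_model_repair/removal_strategies/rules_based_reduction/complete_brute_force_subtree_update.py | get_subsequent_sequences_excluding_repetitions
-- ===== SOURCE A (Python) =====
-- def get_subsequent_sequences_excluding_repetitions(
--     execution_sequence_of_child_subtrees: list[int],
--     repeating_subtree_ids: dict[int, int],
--     min_length_of_sequence
-- ):
--     subsequent_sequences_excluding_repetitions = []
--     temp_sequence = []
--     for i in range(len(execution_sequence_of_child_subtrees)):
--         if execution_sequence_of_child_subtrees[i] not in repeating_subtree_ids:
--             temp_sequence.append(execution_sequence_of_child_subtrees[i])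
--         else:
--             if len(temp_sequence) > min_length_of_sequence:
--                 subsequent_sequences_excluding_repetitions.append(temp_sequence)
--             temp_sequence = []
--
--     if len(temp_sequence) > min_length_of_sequence:
--         subsequent_sequences_excluding_repetitions.append(temp_sequence)
--
--     return subsequent_sequences_excluding_repetitions
-- ===== SOURCE B (Python) =====
-- def get_subsequent_sequences_excluding_repetitions(
--     execution_sequence_of_child_subtrees,
--     repeating_subtree_ids,
--     min_length_of_sequence
-- ):
--     seq = execution_sequence_of_child_subtrees
--     cuts = [i for i, x in enumerate(seq) if x in repeating_subtree_ids]
--     bounds = zip([-1] + cuts, cuts + [len(seq)])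
--     return [seq[a + 1:b] for a, b in bounds if b - a - 1 > min_length_of_sequence]
-- ===== Notes on version B (the rewrite author's own statement) =====
-- stated objective: alternative
-- what changed: B replaces A's accumulator loop (grow a temp buffer, flush it at each delimiter and once at the end) by computing the delimiter positions once with enumerate, pairing consecutive cut points, and returning the slices between them whose length exceeds the threshold.
import Mathlib
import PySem

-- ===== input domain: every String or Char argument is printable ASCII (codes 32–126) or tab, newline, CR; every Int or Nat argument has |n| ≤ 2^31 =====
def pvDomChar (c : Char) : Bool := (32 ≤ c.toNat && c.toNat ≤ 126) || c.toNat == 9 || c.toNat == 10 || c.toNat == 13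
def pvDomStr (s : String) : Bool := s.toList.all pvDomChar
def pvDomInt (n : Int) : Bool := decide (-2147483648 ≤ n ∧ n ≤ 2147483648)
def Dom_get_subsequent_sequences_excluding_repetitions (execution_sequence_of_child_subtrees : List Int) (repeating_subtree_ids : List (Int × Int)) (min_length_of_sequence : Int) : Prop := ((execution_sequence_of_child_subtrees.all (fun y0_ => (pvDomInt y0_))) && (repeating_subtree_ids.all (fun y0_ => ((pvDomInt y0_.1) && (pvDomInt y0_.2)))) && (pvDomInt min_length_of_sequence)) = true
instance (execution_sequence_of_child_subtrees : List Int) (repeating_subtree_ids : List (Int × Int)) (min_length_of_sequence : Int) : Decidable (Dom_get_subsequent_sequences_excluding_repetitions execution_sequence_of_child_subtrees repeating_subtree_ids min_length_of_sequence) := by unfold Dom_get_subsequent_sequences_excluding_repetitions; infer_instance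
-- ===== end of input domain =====

-- B replaces A's flush-on-delimiter accumulator loop by computing the delimiter positions
-- once and slicing the list between consecutive cut points (alternative decomposition).

-- `x in repeating_subtree_ids` (dict key membership), used by both ports
def memRep (rep : List (Int × Int)) (x : Int) : Bool := rep.any (fun p => p.1 == x)

-- ===== PORT A =====
def get_subsequent_sequences_excluding_repetitions (execution_sequence_of_child_subtrees : List Int) (repeating_subtree_ids : List (Int × Int)) (min_length_of_sequence : Int) : List (List Int) :=
  let st := (PySem.List.pyRange 0 (execution_sequence_of_child_subtrees.length : Int) 1).foldl
    (fun (st : List (List Int) × List Int) i =>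
      let x := PySem.List.pyGetD execution_sequence_of_child_subtrees i 0
      if !(memRep repeating_subtree_ids x) then
        (st.1, st.2 ++ [x])
      else
        (if ((st.2.length : Int) > min_length_of_sequence) then st.1 ++ [st.2] else st.1, ([] : List Int)))
    ([], [])
  if ((st.2.length : Int) > min_length_of_sequence) then st.1 ++ [st.2] else st.1

-- ===== PORT B =====
def get_subsequent_sequences_excluding_repetitions_alt (execution_sequence_of_child_subtrees : List Int) (repeating_subtree_ids : List (Int × Int)) (min_length_of_sequence : Int) : List (List Int) :=
  let cuts := ((PySem.List.enumerate execution_sequence_of_child_subtrees 0).filter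
      (fun p => memRep repeating_subtree_ids p.2)).map (fun p => p.1)
  let bounds := List.zip ((-1) :: cuts) (cuts ++ [(execution_sequence_of_child_subtrees.length : Int)])
  (bounds.filter (fun p => p.2 - p.1 - 1 > min_length_of_sequence)).map
    (fun p => PySem.List.slice execution_sequence_of_child_subtrees (some (p.1 + 1)) (some p.2))

-- ===== PRECONDITION & SPEC =====
def Spec_get_subsequent_sequences_excluding_repetitions (execution_sequence_of_child_subtrees : List Int) (repeating_subtree_ids : List (Int × Int)) (min_length_of_sequence : Int) (out : List (List Int)) : Prop := out = get_subsequent_sequences_excluding_repetitions_alt execution_sequence_of_child_subtrees repeating_subtree_ids min_length_of_sequence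
instance (execution_sequence_of_child_subtrees : List Int) (repeating_subtree_ids : List (Int × Int)) (min_length_of_sequence : Int) (out : List (List Int)) : Decidable (Spec_get_subsequent_sequences_excluding_repetitions execution_sequence_of_child_subtrees repeating_subtree_ids min_length_of_sequence out) := by unfold Spec_get_subsequent_sequences_excluding_repetitions; infer_instance

-- ===== CLAIM (what is proved, stated in full; the proofs are below) =====
def Claim_equal_get_subsequent_sequences_excluding_repetitions : Prop := ∀ (execution_sequence_of_child_subtrees : List Int) (repeating_subtree_ids : List (Int × Int)) (min_length_of_sequence : Int), Dom_get_subsequent_sequences_excluding_repetitions execution_sequence_of_child_subtrees repeating_subtree_ids min_length_of_sequence → Spec_get_subsequent_sequences_excluding_repetitions execution_sequence_of_child_subtrees repeating_subtree_ids min_length_of_sequence (get_subsequent_sequences_excluding_repetitions execution_sequence_of_child_subtrees repeating_subtree_ids min_length_of_sequence)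

-- ===== LEMMAS AND PROOFS =====

-- reference: the list of (possibly empty) runs between delimiters, in order
def segs (d : Int → Bool) : List Int → List (List Int)
  | [] => [[]]
  | x :: xs =>
    if d x then [] :: segs d xs
    else match segs d xs with
         | [] => [[x]]
         | s :: r => (x :: s) :: r

theorem segs_ne_nil (d : Int → Bool) (xs : List Int) : segs d xs ≠ [] := by
  cases xs with
  | nil => simp [segs]
  | cons x xs =>
    simp only [segs]
    split_ifs
    · simp
    · cases segs d xs <;> simp

-- the delimiter positions, as Nats
def ncuts (d : Int → Bool) : List Int → List Nat
  | [] => []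
  | x :: xs => (if d x then [0] else []) ++ (ncuts d xs).map (· + 1)

theorem ncuts_lt_len (d : Int → Bool) (xs : List Int) : ∀ i ∈ ncuts d xs, i < xs.length := by
  induction xs with
  | nil => simp [ncuts]
  | cons x xs ih =>
    intro i hi
    simp only [ncuts, List.mem_append, List.mem_map] at hi
    rcases hi with hi | ⟨j, hj, rfl⟩
    · split_ifs at hi <;> simp_all
    · have := ih j hj; simp; omega

theorem ncuts_pairwise (d : Int → Bool) (xs : List Int) : (ncuts d xs).Pairwise (· < ·) := by
  induction xs with
  | nil => simp [ncuts]
  | cons x xs ih =>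
    simp only [ncuts]
    apply List.pairwise_append.2
    refine ⟨?_, ih.map _ (by intro a b h; omega), ?_⟩
    · split_ifs <;> simp
    · intro a ha b hb
      split_ifs at ha <;> simp_all
      rcases hb with ⟨j, _, rfl⟩
      omega

-- A's loop, characterised: flushing runs with the pending buffer prefixed
theorem loopA (d : Int → Bool) (m : Int) (xs : List Int) :
    ∀ (res : List (List Int)) (temp : List Int),
    (let st := xs.foldl
        (fun (st : List (List Int) × List Int) x =>
          if !(d x) then (st.1, st.2 ++ [x])
          else (if ((st.2.length : Int) > m) then st.1 ++ [st.2] else st.1, ([] : List Int)))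
        (res, temp)
     if ((st.2.length : Int) > m) then st.1 ++ [st.2] else st.1)
    = res ++ (match segs d xs with
              | [] => [temp]
              | s :: r => (temp ++ s) :: r).filter (fun s => decide ((s.length : Int) > m)) := by
  induction xs with
  | nil =>
    intro res temp
    simp only [List.foldl_nil, segs, List.append_nil, List.filter]
    by_cases h : (temp.length : Int) > m <;> simp [h]
  | cons x xs ih =>
    intro res temp
    simp only [List.foldl_cons]
    by_cases hd : d x
    · simp only [hd, Bool.not_true, Bool.false_eq_true, if_false]
      rw [ih]
      have hne := segs_ne_nil d xs
      simp only [segs, hd, if_true]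
      cases hsg : segs d xs with
      | nil => exact absurd hsg hne
      | cons s r =>
        simp only [List.nil_append, List.filter]
        by_cases h : (temp.length : Int) > m <;>
          simp [h, List.append_assoc]
    · simp only [hd, Bool.not_false, if_true]
      rw [ih]
      have hne := segs_ne_nil d xs
      simp only [segs, hd, Bool.false_eq_true, if_false]
      cases hsg : segs d xs with
      | nil => exact absurd hsg hne
      | cons s r => simp [List.append_assoc]

theorem slice_cons_shift (x : Int) (xs : List Int) (a b : Int) (ha : 0 ≤ a) (hb : 0 ≤ b) :
    PySem.List.slice (x::xs) (some (a+1)) (some (b+1)) = PySem.List.slice xs (some a) (some b) := by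
  rw [PySem.List.slice_toNat (x::xs) (by omega) (by omega), PySem.List.slice_toNat xs ha hb]
  have h1 : (a+1).toNat = a.toNat + 1 := by omega
  have h2 : (b+1).toNat - (a.toNat + 1) = b.toNat - a.toNat := by omega
  simp [h1, h2]

theorem cast_shift (l : List Nat) :
    (l.map (· + 1)).map (fun (i : Nat) => (i : Int)) = (l.map (fun (i : Nat) => (i : Int))).map (· + 1) := by
  simp only [List.map_map]
  apply List.map_congr_left
  intro i _
  show ((i + 1 : Nat) : Int) = (i : Int) + 1
  omega

-- B's slices at the cut bounds compute exactly the runs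
theorem zipslice (d : Int → Bool) (xs : List Int) :
    (List.zip ((-1) :: (ncuts d xs).map (fun (i : Nat) => (i : Int)))
              ((ncuts d xs).map (fun (i : Nat) => (i : Int)) ++ [(xs.length : Int)])).map
      (fun p => PySem.List.slice xs (some (p.1 + 1)) (some p.2)) = segs d xs := by
  induction xs with
  | nil =>
    simp only [ncuts, List.map_nil, List.nil_append, List.length_nil, Nat.cast_zero]
    norm_num [segs]
    rw [PySem.List.slice_to ([] : List Int) le_rfl]
    simp
  | cons x xs ih =>
    have hlen : ((x::xs).length : Int) = (xs.length : Int) + 1 := by simp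
    by_cases hd : d x
    · have hnc : (ncuts d (x::xs)).map (fun (i : Nat) => (i : Int))
          = 0 :: ((ncuts d xs).map (fun (i : Nat) => (i : Int))).map (· + 1) := by
        simp only [ncuts, hd, if_true, List.cons_append, List.nil_append, List.map_cons,
          Nat.cast_zero, cast_shift]
      rw [hnc, hlen]
      have hz : List.zip ((-1) :: (0:Int) :: ((ncuts d xs).map (fun (i : Nat) => (i : Int))).map (· + 1))
            ((0:Int) :: ((ncuts d xs).map (fun (i : Nat) => (i : Int))).map (· + 1) ++ [(xs.length : Int) + 1])
          = ((-1:Int), (0:Int)) :: List.zip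
              ((((-1) :: (ncuts d xs).map (fun (i : Nat) => (i : Int))).map (· + 1)))
              ((((ncuts d xs).map (fun (i : Nat) => (i : Int)) ++ [(xs.length : Int)]).map (· + 1))) := by
        simp
      rw [hz, List.zip_map]
      simp only [List.map_cons, List.map_map]
      have hhead : PySem.List.slice (x::xs) (some ((-1) + 1)) (some 0) = [] := by
        norm_num
        rw [PySem.List.slice_to (x::xs) le_rfl]
        simp
      rw [hhead]
      have hcongr : ∀ p ∈ List.zip ((-1) :: (ncuts d xs).map (fun (i : Nat) => (i : Int)))
            ((ncuts d xs).map (fun (i : Nat) => (i : Int)) ++ [(xs.length : Int)]),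
          ((fun p => PySem.List.slice (x::xs) (some (p.1 + 1)) (some p.2)) ∘ Prod.map (· + 1) (· + 1)) p
          = PySem.List.slice xs (some (p.1 + 1)) (some p.2) := by
        intro p hp
        obtain ⟨h1, h2⟩ := List.of_mem_zip hp
        have ha : 0 ≤ p.1 + 1 := by
          rcases List.mem_cons.1 h1 with h | h
          · omega
          · obtain ⟨i, _, hi⟩ := List.mem_map.1 h; omega
        have hb : 0 ≤ p.2 := by
          rcases List.mem_append.1 h2 with h | h
          · obtain ⟨i, _, hi⟩ := List.mem_map.1 h; omega
          · simp at h; omega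
        simp only [Function.comp_apply, Prod.map_fst, Prod.map_snd]
        have he : p.1 + 1 + 1 = (p.1 + 1) + 1 := by ring
        rw [he, slice_cons_shift x xs (p.1 + 1) p.2 ha hb]
      rw [List.map_congr_left hcongr, ih]
      simp [segs, hd]
    · have hnc : (ncuts d (x::xs)).map (fun (i : Nat) => (i : Int))
          = ((ncuts d xs).map (fun (i : Nat) => (i : Int))).map (· + 1) := by
        simp only [ncuts, hd, Bool.false_eq_true, if_false, List.nil_append, cast_shift]
      rw [hnc, hlen]
      cases hnc0 : ncuts d xs with
      | nil =>
        rw [hnc0] at ih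
        simp only [List.map_nil, List.nil_append, List.zip_cons_cons, List.zip_nil_right,
          List.map_cons, List.map_nil] at ih ⊢
        norm_num at ih ⊢
        have hsl : PySem.List.slice (x::xs) none (some ((xs.length : Int) + 1)) = x :: xs := by
          rw [PySem.List.slice_to (x::xs) (by omega)]
          have hι : ((xs.length : Int) + 1).toNat = xs.length + 1 := by omega
          simp [hι]
        rw [hsl]
        simp [segs, hd, ← ih]
      | cons c0n rest =>
        rw [hnc0] at ih
        simp only [List.map_cons, List.cons_append] at ih ⊢
        have hz : List.zip ((-1) :: ((c0n : Int) + 1) :: (rest.map (fun (i : Nat) => (i : Int))).map (· + 1))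
              (((c0n : Int) + 1) :: ((rest.map (fun (i : Nat) => (i : Int))).map (· + 1) ++ [(xs.length : Int) + 1]))
            = ((-1:Int), (c0n : Int) + 1) :: List.zip
                (((c0n : Int) :: rest.map (fun (i : Nat) => (i : Int))).map (· + 1))
                ((rest.map (fun (i : Nat) => (i : Int)) ++ [(xs.length : Int)]).map (· + 1)) := by
          simp
        rw [hz]
        rw [List.zip_map]
        simp only [List.map_cons, List.map_map]
        have hcongr : ∀ p ∈ List.zip ((c0n : Int) :: rest.map (fun (i : Nat) => (i : Int)))
              (rest.map (fun (i : Nat) => (i : Int)) ++ [(xs.length : Int)]),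
            ((fun p => PySem.List.slice (x::xs) (some (p.1 + 1)) (some p.2)) ∘ Prod.map (· + 1) (· + 1)) p
            = PySem.List.slice xs (some (p.1 + 1)) (some p.2) := by
          intro p hp
          obtain ⟨h1, h2⟩ := List.of_mem_zip hp
          have ha : 0 ≤ p.1 + 1 := by
            rcases List.mem_cons.1 h1 with h | h
            · omega
            · obtain ⟨i, _, hi⟩ := List.mem_map.1 h; omega
          have hb : 0 ≤ p.2 := by
            rcases List.mem_append.1 h2 with h | h
            · obtain ⟨i, _, hi⟩ := List.mem_map.1 h; omega
            · simp at h; omega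
          simp only [Function.comp_apply, Prod.map_fst, Prod.map_snd]
          have he : p.1 + 1 + 1 = (p.1 + 1) + 1 := by ring
          rw [he, slice_cons_shift x xs (p.1 + 1) p.2 ha hb]
        rw [List.map_congr_left hcongr]
        have hhead : PySem.List.slice (x::xs) (some ((-1) + 1)) (some ((c0n : Int) + 1))
            = x :: PySem.List.slice xs (some ((-1) + 1)) (some (c0n : Int)) := by
          norm_num
          rw [PySem.List.slice_to (x::xs) (by omega)]
          have hι : ((c0n : Int) + 1).toNat = c0n + 1 := by omega
          simp [hι, List.take_succ_cons]
        rw [hhead]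
        simp only [List.zip_cons_cons, List.map_cons] at ih
        simp only [segs, hd, Bool.false_eq_true, if_false]
        rw [← ih]

-- the port's enumerate-based cuts are ncuts
theorem cuts_eq_gen (d : Int → Bool) (xs : List Int) : ∀ (s : Int),
    ((PySem.List.enumerate xs s).filter (fun p => d p.2)).map (fun p => p.1)
      = (ncuts d xs).map (fun (i : Nat) => (i : Int) + s) := by
  induction xs with
  | nil => intro s; simp [PySem.List.enumerate_nil, ncuts]
  | cons x xs ih =>
    intro s
    rw [PySem.List.enumerate_cons]
    by_cases hd : d x
    · simp only [List.filter_cons, hd, if_true, List.map_cons, ncuts, List.cons_append,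
        List.nil_append, ih (s+1), List.map_map]
      congr 1
      · omega
      · apply List.map_congr_left
        intro i _
        show (i : Int) + (s + 1) = ((i + 1 : Nat) : Int) + s
        omega
    · simp only [List.filter_cons, hd, Bool.false_eq_true, if_false, ncuts, List.nil_append,
        ih (s+1), List.map_map]
      apply List.map_congr_left
      intro i _
      show (i : Int) + (s + 1) = ((i + 1 : Nat) : Int) + s
      omega

-- aligned facts about consecutive zip pairs of a strictly increasing bound list
theorem zip_bounds_facts (cs : List Int) : ∀ (a n : Int),
    List.Pairwise (· < ·) (a :: (cs ++ [n])) →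
    ∀ p ∈ List.zip (a :: cs) (cs ++ [n]), a ≤ p.1 ∧ p.1 < p.2 ∧ p.2 ≤ n := by
  induction cs with
  | nil =>
    intro a n hpw p hp
    simp only [List.nil_append, List.zip_cons_cons, List.zip_nil_right, List.mem_singleton] at hp
    subst hp
    simp only [List.nil_append, List.pairwise_cons, List.mem_singleton] at hpw
    have := hpw.1 n rfl
    exact ⟨le_rfl, this, le_rfl⟩
  | cons c cs ih =>
    intro a n hpw p hp
    simp only [List.cons_append, List.zip_cons_cons, List.mem_cons] at hp
    have hpw' := List.pairwise_cons.1 hpw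
    have hac : a < c := hpw'.1 c (by simp)
    have hpw2 : List.Pairwise (· < ·) (c :: (cs ++ [n])) := hpw'.2
    rcases hp with rfl | hp
    · refine ⟨le_rfl, hac, ?_⟩
      have := (List.pairwise_cons.1 hpw2).1 n (by simp)
      omega
    · have := ih c n hpw2 p hp
      exact ⟨by omega, this.2.1, this.2.2⟩

theorem bounds_pairwise (d : Int → Bool) (xs : List Int) :
    List.Pairwise (· < ·) ((-1) :: ((ncuts d xs).map (fun (i : Nat) => (i : Int)) ++ [(xs.length : Int)])) := by
  apply List.pairwise_cons.2
  constructor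
  · intro b hb
    rcases List.mem_append.1 hb with h | h
    · obtain ⟨i, _, hi⟩ := List.mem_map.1 h; omega
    · simp at h; omega
  · apply List.pairwise_append.2
    refine ⟨(ncuts_pairwise d xs).map _ ?_, by simp, ?_⟩
    · intro a b h
      exact_mod_cast h
    · intro a ha b hb
      simp only [List.mem_singleton] at hb
      subst hb
      obtain ⟨i, hi, hc⟩ := List.mem_map.1 ha
      have := ncuts_lt_len d xs i hi
      omega

-- A equals the filtered runs
theorem A_eq_filter_segs (seq : List Int) (rep : List (Int × Int)) (m : Int) :
    get_subsequent_sequences_excluding_repetitions seq rep m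
      = (segs (memRep rep) seq).filter (fun s => decide ((s.length : Int) > m)) := by
  have h := PySem.List.foldl_pyRange_zero_pyGetD' seq 0
    (fun (st : List (List Int) × List Int) x =>
      if !(memRep rep x) then (st.1, st.2 ++ [x])
      else (if ((st.2.length : Int) > m) then st.1 ++ [st.2] else st.1, ([] : List Int)))
    (([], []) : List (List Int) × List Int)
  have h2 := loopA (memRep rep) m seq [] []
  simp only at h2
  unfold get_subsequent_sequences_excluding_repetitions
  simp only [h, h2]
  cases hsg : segs (memRep rep) seq with
  | nil => exact absurd hsg (segs_ne_nil _ _)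
  | cons s r => simp

-- B equals the filtered runs
theorem B_eq_filter_segs (seq : List Int) (rep : List (Int × Int)) (m : Int) :
    get_subsequent_sequences_excluding_repetitions_alt seq rep m
      = (segs (memRep rep) seq).filter (fun s => decide ((s.length : Int) > m)) := by
  unfold get_subsequent_sequences_excluding_repetitions_alt
  have hcuts : ((PySem.List.enumerate seq 0).filter (fun p => memRep rep p.2)).map (fun p => p.1)
      = (ncuts (memRep rep) seq).map (fun (i : Nat) => (i : Int)) := by
    rw [cuts_eq_gen (memRep rep) seq 0]
    apply List.map_congr_left
    intro i _
    omega
  simp only [hcuts]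
  rw [← zipslice (memRep rep) seq, List.filter_map]
  congr 1
  apply List.filter_congr
  intro q hq
  have hfacts := zip_bounds_facts ((ncuts (memRep rep) seq).map (fun (i : Nat) => (i : Int)))
    (-1) (seq.length : Int) (bounds_pairwise (memRep rep) seq) q hq
  obtain ⟨hq1, hq12, hq2⟩ := hfacts
  have h2n : q.2 = ((q.2.toNat : Nat) : Int) := by omega
  have h1n : q.1 + 1 = (((q.1 + 1).toNat : Nat) : Int) := by omega
  have hlen2 : ((PySem.List.slice seq (some (q.1 + 1)) (some q.2)).length : Int) = q.2 - q.1 - 1 := by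
    rw [PySem.List.length_slice, h2n, h1n, PySem.List.clampIdx_natCast, PySem.List.clampIdx_natCast]
    have hb1 : q.2.toNat ≤ seq.length := by omega
    have hb2 : (q.1 + 1).toNat ≤ seq.length := by omega
    rw [Nat.min_eq_left hb1, Nat.min_eq_left hb2]
    omega
  show decide (q.2 - q.1 - 1 > m) = decide (((PySem.List.slice seq (some (q.1 + 1)) (some q.2)).length : Int) > m)
  rw [hlen2]

-- ===== VERDICT (by name: the statement is the Claim_ definition above) =====
theorem get_subsequent_sequences_excluding_repetitions_spec : Claim_equal_get_subsequent_sequences_excluding_repetitions := by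
  intro seq rep m _
  unfold Spec_get_subsequent_sequences_excluding_repetitions
  rw [A_eq_filter_segs, B_eq_filter_segs]
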